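-- pv_equiv track=rewrite | github.com/ViachaslauKazakou/Python-Preparations | code/travel_saleman_problem.py | decode_route
-- ===== SOURCE A (Python) =====
-- def decode_route(bitstring, n_cities):
--     """
--     Decode a bitstring (of length n_cities**2) into a route.
--     Each row in the n x n grid corresponds to a city.
--     The column index of the '1' in that row indicates its tour order.
--
--     For example, an outcome for 4 cities:
--       "0001000100010001" (bits grouped as 4 bits) becomes:
--       Row 0: 0001 -> position 3
--       Row 1: 0001 -> position 3  (if duplicate or missing ones occur, handle accordingly)
--
--     This simple decoder assumes each row has exactly one '1'.
--     If not, it returns None.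
--     """
--     # Ensure the bitstring has length n_cities^2
--     if len(bitstring) != n_cities ** 2:
--         return None
--
--     route = [None] * n_cities
--     # Break up the bitstring into rows (we use little-endian order,
--     # so reverse each group for clarity)
--     for i in range(n_cities):
--         row = bitstring[i*n_cities:(i+1)*n_cities]
--         # Reverse so that bit0 is on the right if needed
--         row = row[::-1]
--         if row.count('1') != 1:
--             return None
--         pos = row.index('1')
--         route[i] = pos
--     return route
-- ===== SOURCE B (Python) =====
-- def decode_route(bitstring, n_cities):
--     if len(bitstring) != n_cities ** 2:
--         return None
--     route = [-1] * n_cities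
--     for idx, c in enumerate(bitstring):
--         if c == '1':
--             row = idx // n_cities
--             if route[row] != -1:
--                 return None
--             route[row] = n_cities - 1 - idx % n_cities
--     if -1 in route:
--         return None
--     return route
-- ===== Notes on version B (the rewrite author's own statement) =====
-- stated objective: alternative
-- what changed: B replaces A's per-row slicing/reversal with count and index calls by a single flat pass over the bitstring using idx//n and idx%n arithmetic, recording each row's position in a route array initialised to -1, failing immediately on a duplicate '1' in a row and at the end on any row left at -1.
-- outside the precondition, e.g. on decode_route('1', -1): A returns [], B raises IndexError
import Mathlib
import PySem

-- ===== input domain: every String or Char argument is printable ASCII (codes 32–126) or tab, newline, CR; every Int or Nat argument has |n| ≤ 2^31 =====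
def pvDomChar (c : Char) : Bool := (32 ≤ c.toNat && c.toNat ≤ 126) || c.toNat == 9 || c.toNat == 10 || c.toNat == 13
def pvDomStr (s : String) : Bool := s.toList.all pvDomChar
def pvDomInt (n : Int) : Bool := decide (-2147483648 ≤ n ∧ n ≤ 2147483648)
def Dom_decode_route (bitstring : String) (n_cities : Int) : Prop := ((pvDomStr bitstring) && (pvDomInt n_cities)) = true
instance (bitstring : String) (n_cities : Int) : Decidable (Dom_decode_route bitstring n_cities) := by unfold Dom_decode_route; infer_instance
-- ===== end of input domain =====

-- B replaces A's per-row slicing/reversal with count and index calls by a single flat pass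
-- using idx//n and idx%n arithmetic into a -1-initialised route array (alternative decomposition).

-- ===== PORT A =====
-- the loop 'for i in range(n_cities)' of A; acc collects route entries in order, reversed at the end
def decodeRouteGoA (bs : List Char) (n : Int) : List Int → List Int → Option (List Int)
  | [], acc => some acc.reverse
  | i :: is, acc =>
    -- row = bitstring[i*n_cities:(i+1)*n_cities]; row = row[::-1]
    let rrow := (PySem.List.slice bs (some (i * n)) (some ((i + 1) * n))).reverse
    if PySem.List.count rrow '1' ≠ 1 then none
    else
      match PySem.List.index? rrow '1' with
      | some pos => decodeRouteGoA bs n is ((pos : Int) :: acc)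
      | none => none  -- ValueError; unreachable: guarded by count = 1

def decode_route (bitstring : String) (n_cities : Int) : Option (List Int) :=
  if PySem.Str.len bitstring ≠ n_cities ^ 2 then none
  else decodeRouteGoA bitstring.toList n_cities (PySem.List.pyRange 0 n_cities 1) []

-- ===== PORT B =====
-- the loop 'for idx, c in enumerate(bitstring)' of B, carrying idx explicitly
def decodeRouteGoB (n : Int) : Nat → List Char → List Int → Option (List Int)
  | _, [], route => some route
  | idx, c :: rest, route =>
    if c = '1' then
      let row := PySem.Int.floordiv (idx : Int) n
      match PySem.List.pyGet? route row with
      | some v =>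
        if v ≠ -1 then none
        -- route[row] = n_cities - 1 - idx % n_cities; row.toNat is exact: row ≥ 0 whenever reached
        else decodeRouteGoB n (idx + 1) rest (route.set row.toNat (n - 1 - PySem.Int.mod (idx : Int) n))
      | none => none  -- IndexError; outside Pre_ (route non-empty whenever a '1' is scanned and n ≥ 0)
    else decodeRouteGoB n (idx + 1) rest route

def decode_route_alt (bitstring : String) (n_cities : Int) : Option (List Int) :=
  if PySem.Str.len bitstring ≠ n_cities ^ 2 then none
  else
    match decodeRouteGoB n_cities 0 bitstring.toList (List.replicate n_cities.toNat (-1)) with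
    | none => none
    | some route => if (-1) ∈ route then none else some route

-- ===== PRECONDITION & SPEC =====
-- Pre_ restricts to the natural domain: it excludes only negative n_cities whose square happens to
-- equal the length, where A's returned [] is an accident of range() over a negative count and B's
-- flat indexing may raise IndexError.
def Pre_decode_route (bitstring : String) (n_cities : Int) : Prop :=
  0 ≤ n_cities ∨ PySem.Str.len bitstring ≠ n_cities ^ 2
instance (bitstring : String) (n_cities : Int) : Decidable (Pre_decode_route bitstring n_cities) := by
  unfold Pre_decode_route; infer_instance

def pvWitness_decode_route : String × Int := ("100010001", 3)

def Spec_decode_route (bitstring : String) (n_cities : Int) (out : Option (List Int)) : Prop :=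
  out = decode_route_alt bitstring n_cities
instance (bitstring : String) (n_cities : Int) (out : Option (List Int)) : Decidable (Spec_decode_route bitstring n_cities out) := by
  unfold Spec_decode_route; infer_instance

-- ===== CLAIM (what is proved, stated in full; the proofs are below) =====
def Claim_equal_decode_route : Prop := ∀ (bitstring : String) (n_cities : Int), Dom_decode_route bitstring n_cities → Pre_decode_route bitstring n_cities → Spec_decode_route bitstring n_cities (decode_route bitstring n_cities)

-- ===== LEMMAS AND PROOFS =====

-- proof-only helpers: the rows of the bitstring, the position of '1', the per-side row values
def pvChunks (N : Nat) : Nat → List Char → List (List Char)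
  | 0, _ => []
  | m + 1, cs => cs.take N :: pvChunks N m (cs.drop N)

def pvPos (r : List Char) : Nat := (PySem.List.index? r '1').getD 0

def pvFA (n : Int) (r : List Char) : Int := ((pvPos r.reverse : Nat) : Int)

def pvFB (n : Int) (r : List Char) : Int :=
  if r.count '1' = 1 then n - 1 - (pvPos r : Int) else -1

lemma pvChunks_length (N m : Nat) (cs : List Char) : (pvChunks N m cs).length = m := by
  induction m generalizing cs with
  | zero => rfl
  | succ m ih => simp [pvChunks, ih]

lemma pvChunks_flatten (N m : Nat) (cs : List Char) (h : cs.length = m * N) :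
    (pvChunks N m cs).flatten = cs := by
  induction m generalizing cs with
  | zero => simp at h; simp [pvChunks, h]
  | succ m ih =>
    have : (cs.drop N).length = m * N := by simp [Nat.succ_mul] at h ⊢; omega
    simp [pvChunks, ih _ this]

lemma pvChunks_row_len (N m : Nat) (cs : List Char) (h : cs.length = m * N) :
    ∀ r ∈ pvChunks N m cs, r.length = N := by
  induction m generalizing cs with
  | zero => simp [pvChunks]
  | succ m ih =>
    have hd : (cs.drop N).length = m * N := by simp [Nat.succ_mul] at h ⊢; omega
    intro r hr
    rcases List.mem_cons.mp hr with h1 | h2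
    · subst h1; simp [Nat.succ_mul] at h ⊢; omega
    · exact ih _ hd r h2

lemma pv_fd (n : Int) (hn : 0 < n) (i j : Nat) (hj : j < n.toNat) :
    PySem.Int.floordiv ((i * n.toNat + j : Nat) : Int) n = (i : Int) ∧
    PySem.Int.mod ((i * n.toNat + j : Nat) : Int) n = (j : Int) := by
  have hN : ((n.toNat : Int)) = n := Int.toNat_of_nonneg hn.le
  have hj' : (j : Int) < n := by omega
  have hcast : ((i * n.toNat + j : Nat) : Int) = (j : Int) + (i : Int) * n := by push_cast [hN]; ring
  rw [PySem.Int.floordiv_eq_ediv_of_pos hn, PySem.Int.mod_eq_emod_of_pos hn, hcast]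
  constructor
  · rw [Int.add_mul_ediv_right _ _ (ne_of_gt hn), Int.ediv_eq_zero_of_lt (by positivity) hj', zero_add]
  · rw [Int.add_mul_emod_self_right, Int.emod_eq_of_lt (by positivity) hj']

lemma pv_index?_append_not_mem (l t : List Char) (h : '1' ∉ l) :
    PySem.List.index? (l ++ t) '1' = (PySem.List.index? t '1').map (· + l.length) := by
  induction l with
  | nil => simp
  | cons c l ih =>
    have hc : c ≠ '1' := fun hh => h (by simp [hh])
    rw [List.cons_append, PySem.List.index?_cons_of_ne _ hc, ih (fun hh => h (List.mem_cons_of_mem _ hh))]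
    cases PySem.List.index? t '1' <;> simp <;> omega

lemma pv_split_of_count_one (cs : List Char) (hc : cs.count '1' = 1) :
    ∃ pre suf, cs = pre ++ '1' :: suf ∧ '1' ∉ pre ∧ '1' ∉ suf := by
  induction cs with
  | nil => simp at hc
  | cons c cs ih =>
    by_cases h : c = '1'
    · subst h
      refine ⟨[], cs, by simp, by simp, ?_⟩
      simp [List.count_cons] at hc
      exact (List.count_eq_zero.mp hc)
    · simp [h] at hc
      obtain ⟨pre, suf, rfl, hp, hs⟩ := ih hc
      refine ⟨c :: pre, suf, by simp, ?_, hs⟩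
      simp [hp]
      exact fun hh => h hh.symm

lemma pv_pos_split (pre suf : List Char) (hp : '1' ∉ pre) :
    pvPos (pre ++ '1' :: suf) = pre.length := by
  unfold pvPos
  rw [pv_index?_append_not_mem _ _ hp, PySem.List.index?_cons_self]
  simp

lemma pv_pos_lt (cs : List Char) (hc : cs.count '1' = 1) : pvPos cs < cs.length := by
  obtain ⟨pre, suf, rfl, hp, hs⟩ := pv_split_of_count_one cs hc
  rw [pv_pos_split _ _ hp]
  simp

lemma pv_fAB (n : Int) (hn : 0 < n) (r : List Char) (hr : r.length = n.toNat)
    (hc : r.count '1' = 1) : pvFA n r = pvFB n r := by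
  obtain ⟨pre, suf, rfl, hp, hs⟩ := pv_split_of_count_one r hc
  have h1 : pvPos (pre ++ '1' :: suf) = pre.length := pv_pos_split _ _ hp
  have h2 : pvPos ((pre ++ '1' :: suf).reverse) = suf.length := by
    have : (pre ++ '1' :: suf).reverse = suf.reverse ++ '1' :: pre.reverse := by simp
    rw [this, pv_pos_split _ _ (by simpa using hs)]
    simp
  unfold pvFA pvFB
  rw [h1, h2, if_pos hc]
  simp at hr
  omega

lemma pv_goB_occ (n : Int) (hn : 0 < n) (i : Nat) (v : Int) (hv : v ≠ -1) :
    ∀ (cs rest : List Char) (j : Nat) (route : List Int),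
      j + cs.length ≤ n.toNat → route[i]? = some v →
      decodeRouteGoB n (i * n.toNat + j) (cs ++ rest) route =
        if '1' ∈ cs then none
        else decodeRouteGoB n (i * n.toNat + (j + cs.length)) rest route := by
  intro cs
  induction cs with
  | nil => intro rest j route hle hr; simp [decodeRouteGoB]
  | cons c cs ih =>
    intro rest j route hle hr
    have hj : j < n.toNat := by simp at hle; omega
    obtain ⟨hfd, hmd⟩ := pv_fd n hn i j hj
    by_cases hc : c = '1'
    · subst hc
      rw [List.cons_append]
      simp only [decodeRouteGoB, if_pos rfl, hfd, PySem.List.pyGet?_natCast, hr]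
      simp [hv]
    · rw [List.cons_append]
      simp only [decodeRouteGoB, if_neg hc]
      have harith : i * n.toNat + j + 1 = i * n.toNat + (j + 1) := by omega
      rw [harith, ih rest (j + 1) route (by simp at hle ⊢; omega) hr]
      have hcc : ¬ ('1' : Char) = c := fun hh => hc hh.symm
      by_cases hm : '1' ∈ cs
      · simp [hm, hcc]
      · have hm' : '1' ∉ c :: cs := by
          simp [List.mem_cons, hm]; exact hcc
        rw [if_neg hm, if_neg hm']
        congr 1
        simp; omega

lemma pv_goB_row (n : Int) (hn : 0 < n) (i : Nat) :
    ∀ (cs rest : List Char) (j : Nat) (route : List Int),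
      j + cs.length ≤ n.toNat → route[i]? = some (-1) →
      decodeRouteGoB n (i * n.toNat + j) (cs ++ rest) route =
        if cs.count '1' = 0 then decodeRouteGoB n (i * n.toNat + (j + cs.length)) rest route
        else if cs.count '1' = 1 then
          decodeRouteGoB n (i * n.toNat + (j + cs.length)) rest
            (route.set i (n - 1 - ((j + pvPos cs : Nat) : Int)))
        else none := by
  intro cs
  induction cs with
  | nil => intro rest j route hle hr; simp [decodeRouteGoB]
  | cons c cs ih =>
    intro rest j route hle hr
    have hj : j < n.toNat := by simp at hle; omega
    have hi : i < route.length := (List.getElem?_eq_some_iff.mp hr).1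
    obtain ⟨hfd, hmd⟩ := pv_fd n hn i j hj
    by_cases hc : c = '1'
    · subst hc
      rw [List.cons_append]
      simp only [decodeRouteGoB, hfd, PySem.List.pyGet?_natCast, hr, hmd]
      -- v = -1, so we take the set branch
      rw [if_pos trivial, if_neg (by simp : ¬ ((-1 : Int) ≠ -1))]
      have htn : ((i : Int)).toNat = i := by simp
      rw [htn]
      set route' := route.set i (n - 1 - (j : Int)) with hroute'
      have hr' : route'[i]? = some (n - 1 - (j : Int)) := List.getElem?_set_self (by simpa using hi)
      have hv' : (n - 1 - (j : Int)) ≠ -1 := by omega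
      have harith : i * n.toNat + j + 1 = i * n.toNat + (j + 1) := by omega
      rw [harith, pv_goB_occ n hn i _ hv' cs rest (j + 1) route' (by simp at hle ⊢; omega) hr']
      by_cases hm : '1' ∈ cs
      · have : cs.count '1' ≠ 0 := by simp [List.count_eq_zero]; exact hm
        have h2 : ('1' :: cs).count '1' ≠ 0 := by simp [List.count_cons]
        have h3 : ('1' :: cs).count '1' ≠ 1 := by
          have := List.count_pos_iff.mpr hm
          simp [List.count_cons]; omega
        simp [hm, h2, h3]
        exact fun h => absurd h this
      · have hcs0 : cs.count '1' = 0 := List.count_eq_zero.mpr hm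
        have h1 : ('1' :: cs).count '1' = 1 := by simp [List.count_cons, hcs0]
        rw [if_neg hm, if_neg (by rw [h1]; exact one_ne_zero), if_pos h1]
        have hpos : pvPos ('1' :: cs) = 0 := by unfold pvPos; rw [PySem.List.index?_cons_self]; rfl
        rw [hpos]
        have hre : route' = route.set i (n - 1 - ((j + 0 : Nat) : Int)) := by
          rw [hroute']; norm_num
        rw [← hre]
        congr 1
        simp; omega
    · rw [List.cons_append]
      have hstep : decodeRouteGoB n (i * n.toNat + j) (c :: (cs ++ rest)) route
          = decodeRouteGoB n (i * n.toNat + j + 1) (cs ++ rest) route := by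
        simp only [decodeRouteGoB]
        rw [if_neg hc]
      rw [hstep]
      have harith : i * n.toNat + j + 1 = i * n.toNat + (j + 1) := by omega
      have hle' : (j + 1) + cs.length ≤ n.toNat := by simp at hle; omega
      rw [harith, ih rest (j + 1) route hle' hr]
      have hcnt : (c :: cs).count '1' = cs.count '1' := by
        simp [List.count_cons]
        exact hc
      rw [hcnt]
      by_cases h0 : cs.count '1' = 0
      · simp only [if_pos h0]
        congr 2
        simp; omega
      · rw [if_neg h0]
        by_cases h1 : cs.count '1' = 1
        · rw [if_pos h1, if_pos h1]
          have hmem : '1' ∈ cs := List.count_pos_iff.mp (by omega)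
          obtain ⟨k, hk⟩ := Option.isSome_iff_exists.mp ((PySem.List.index?_isSome_iff cs '1').mpr hmem)
          have hpos : pvPos (c :: cs) = pvPos cs + 1 := by
            unfold pvPos; rw [PySem.List.index?_cons_of_ne _ hc, hk]; rfl
          rw [hpos]
          have e1 : (j + 1) + cs.length = j + (c :: cs).length := by simp; omega
          have e2 : (j + 1) + pvPos cs = j + (pvPos cs + 1) := by omega
          rw [e1, e2, if_neg h0]
        · simp [h0, h1]

lemma pv_set_append (pre : List Int) (x v : Int) (t : List Int) :
    (pre ++ x :: t).set pre.length v = pre ++ v :: t := by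
  induction pre with
  | nil => rfl
  | cons a l ih => simp [ih]

lemma pv_goB_rows (n : Int) (hn : 0 < n) :
    ∀ (rows : List (List Char)) (pre : List Int),
      (∀ r ∈ rows, r.length = n.toNat) →
      decodeRouteGoB n (pre.length * n.toNat) rows.flatten (pre ++ List.replicate rows.length (-1)) =
        if rows.all (fun r => r.count '1' ≤ 1) then some (pre ++ rows.map (pvFB n)) else none := by
  intro rows
  induction rows with
  | nil => intro pre _; simp [decodeRouteGoB]
  | cons r rows ih =>
    intro pre hlen
    have hr : r.length = n.toNat := hlen r (by simp)
    have hrep : List.replicate (r :: rows).length (-1 : Int) = (-1) :: List.replicate rows.length (-1) := rfl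
    have hget : (pre ++ (-1) :: List.replicate rows.length (-1 : Int))[pre.length]? = some (-1) := by
      rw [List.getElem?_append_right (le_refl _)]
      simp
    rw [hrep, List.flatten_cons]
    rw [show pre.length * n.toNat = pre.length * n.toNat + 0 from by omega]
    rw [pv_goB_row n hn pre.length r rows.flatten 0 _ (by omega) hget]
    by_cases h0 : r.count '1' = 0
    · rw [if_pos h0]
      have hpre' : pre ++ (-1 : Int) :: List.replicate rows.length (-1) =
          (pre ++ [-1]) ++ List.replicate rows.length (-1) := by simp
      have hidx : pre.length * n.toNat + (0 + r.length) = (pre ++ [(-1 : Int)]).length * n.toNat := by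
        simp [hr]; ring
      rw [hpre', hidx, ih (pre ++ [-1]) (fun r hm => hlen r (by simp [hm]))]
      have hfb : pvFB n r = -1 := by simp [pvFB, h0]
      by_cases hall : rows.all (fun r => r.count '1' ≤ 1)
      · simp [hall, h0, hfb]
      · simp [hall, h0]
    · by_cases h1 : r.count '1' = 1
      · rw [if_neg h0, if_pos h1]
        have hset : (pre ++ (-1 : Int) :: List.replicate rows.length (-1)).set pre.length
              (n - 1 - ((0 + pvPos r : Nat) : Int))
            = (pre ++ [n - 1 - (pvPos r : Int)]) ++ List.replicate rows.length (-1) := by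
          rw [pv_set_append]
          simp
        have hidx : pre.length * n.toNat + (0 + r.length) = (pre ++ [(n - 1 - (pvPos r : Int))]).length * n.toNat := by
          simp [hr]; ring
        rw [hset, hidx, ih _ (fun r hm => hlen r (by simp [hm]))]
        have hfb : pvFB n r = n - 1 - (pvPos r : Int) := by simp [pvFB, h1]
        by_cases hall : rows.all (fun r => r.count '1' ≤ 1)
        · simp [hall, h1, hfb]
        · simp [hall, h1]
      · rw [if_neg h0, if_neg h1]
        rw [if_neg (by
          intro hcontra
          simp at hcontra
          exact absurd hcontra.1 (by omega))]

lemma pv_goA (bs : List Char) (n : Int) (hn : 0 < n) :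
    ∀ (m i : Nat) (acc : List Int), i + m = n.toNat →
      decodeRouteGoA bs n (PySem.List.pyRange (i : Int) n 1) acc =
        (if (pvChunks n.toNat m (bs.drop (i * n.toNat))).all (fun r => r.count '1' = 1)
         then some (acc.reverse ++ (pvChunks n.toNat m (bs.drop (i * n.toNat))).map (pvFA n))
         else none) := by
  intro m
  induction m with
  | zero =>
    intro i acc hi
    have : ((i : Int)) = n := by omega
    rw [this, PySem.List.pyRange_one_eq_nil (le_refl n)]
    simp [decodeRouteGoA, pvChunks]
  | succ m ih =>
    intro i acc hi
    have hilt : ((i : Int)) < n := by omega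
    rw [PySem.List.pyRange_one_cons hilt]
    have hb1 : (i : Int) * n = ((i * n.toNat : Nat) : Int) := by
      push_cast [Int.toNat_of_nonneg hn.le]; ring
    have hb2 : ((i : Int) + 1) * n = (((i + 1) * n.toNat : Nat) : Int) := by
      push_cast [Int.toNat_of_nonneg hn.le]; ring
    have hslice : PySem.List.slice bs (some ((i : Int) * n)) (some (((i : Int) + 1) * n))
        = (bs.drop (i * n.toNat)).take n.toNat := by
      rw [hb1, hb2, PySem.List.slice_natCast,
        show (i + 1) * n.toNat - i * n.toNat = n.toNat from by rw [Nat.succ_mul]; omega]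
    simp only [decodeRouteGoA, hslice]
    set row := (bs.drop (i * n.toNat)).take n.toNat with hrow
    have hchunks : pvChunks n.toNat (m + 1) (bs.drop (i * n.toNat))
        = row :: pvChunks n.toNat m (bs.drop ((i + 1) * n.toNat)) := by
      show _ :: pvChunks n.toNat m ((bs.drop (i * n.toNat)).drop n.toNat) = _
      rw [List.drop_drop,
        show i * n.toNat + n.toNat = (i + 1) * n.toNat from by rw [Nat.succ_mul]]
    rw [hchunks]
    have hcr : PySem.List.count row.reverse '1' = row.count '1' := by
      rw [PySem.List.count_eq, List.count_reverse]
    by_cases hc1 : row.count '1' = 1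
    · rw [if_neg (by rw [hcr, hc1]; simp)]
      have hmem : '1' ∈ row.reverse := by
        rw [List.mem_reverse]
        exact List.count_pos_iff.mp (by omega)
      obtain ⟨k, hk⟩ := Option.isSome_iff_exists.mp ((PySem.List.index?_isSome_iff row.reverse '1').mpr hmem)
      simp only [hk]
      have harith : (i + 1) + m = n.toNat := by omega
      rw [show ((i : Int) + 1) = ((i + 1 : Nat) : Int) from by push_cast; ring]
      rw [ih (i + 1) ((k : Int) :: acc) harith]
      have hfa : pvFA n row = (k : Int) := by
        unfold pvFA pvPos
        rw [hk]
        rfl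
      by_cases hall : (pvChunks n.toNat m (bs.drop ((i + 1) * n.toNat))).all (fun r => r.count '1' = 1)
      · rw [if_pos hall, if_pos (by simp [hall, hc1])]
        simp [hfa]
      · rw [if_neg hall, if_neg (by simp [hall])]
    · rw [if_pos (by rw [hcr]; exact hc1), if_neg (by simp [hc1])]

lemma pv_main (bitstring : String) (n : Int) (hpre : Pre_decode_route bitstring n) :
    decode_route bitstring n = decode_route_alt bitstring n := by
  unfold decode_route decode_route_alt
  by_cases hg : PySem.Str.len bitstring ≠ n ^ 2
  · rw [if_pos hg, if_pos hg]
  · rw [if_neg hg, if_neg hg]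
    have h0n : 0 ≤ n := hpre.resolve_right hg
    have hlen : PySem.Str.len bitstring = n ^ 2 := not_ne_iff.mp hg
    rw [PySem.Str.len_eq] at hlen
    set bs := bitstring.toList with hbs
    have hNn : ((n.toNat : Int)) = n := Int.toNat_of_nonneg h0n
    rcases eq_or_lt_of_le h0n with hz | hn
    · -- n = 0: empty bitstring, both sides return some []
      have hbs0 : bs = [] := by
        have : (bs.length : Int) = 0 := by rw [hlen, ← hz]; ring
        simpa using this
      rw [hbs0, ← hz]
      rw [PySem.List.pyRange_one_eq_nil (le_refl 0)]
      simp [decodeRouteGoA, decodeRouteGoB]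
    · -- n > 0
      have hNN : bs.length = n.toNat * n.toNat := by
        have : (bs.length : Int) = ((n.toNat * n.toNat : Nat) : Int) := by
          rw [hlen, pow_two]; push_cast [hNn]; ring
        exact_mod_cast this
      set rows := pvChunks n.toNat n.toNat bs with hrows
      have hflat : rows.flatten = bs := pvChunks_flatten _ _ _ hNN
      have hrl : ∀ r ∈ rows, r.length = n.toNat := pvChunks_row_len _ _ _ hNN
      have hlr : rows.length = n.toNat := pvChunks_length _ _ _
      -- A side
      have hA : decodeRouteGoA bs n (PySem.List.pyRange 0 n 1) [] =
          (if rows.all (fun r => r.count '1' = 1) then some (rows.map (pvFA n)) else none) := by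
        have := pv_goA bs n hn n.toNat 0 [] (by omega)
        simp only [Nat.cast_zero, Nat.zero_mul, List.drop_zero] at this
        simpa using this
      -- B side
      have hB : decodeRouteGoB n 0 bs (List.replicate n.toNat (-1)) =
          (if rows.all (fun r => r.count '1' ≤ 1) then some (rows.map (pvFB n)) else none) := by
        have := pv_goB_rows n hn rows [] hrl
        simp only [List.nil_append, List.length_nil, Nat.zero_mul, hflat, hlr] at this
        exact this
      rw [hA, hB]
      by_cases hall : rows.all (fun r => r.count '1' = 1)
      · have hle : rows.all (fun r => r.count '1' ≤ 1) := by
          simp only [List.all_eq_true, decide_eq_true_eq] at hall ⊢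
          exact fun r hr => le_of_eq (hall r hr)
        rw [if_pos hall, if_pos hle]
        have hnomem : (-1 : Int) ∉ rows.map (pvFB n) := by
          intro hmem
          obtain ⟨r, hr, hfbr⟩ := List.mem_map.mp hmem
          have hc1 : r.count '1' = 1 := by
            simp only [List.all_eq_true, decide_eq_true_eq] at hall
            exact hall r hr
          have hplt : pvPos r < r.length := pv_pos_lt r hc1
          have : pvFB n r = n - 1 - (pvPos r : Int) := by simp [pvFB, hc1]
          rw [this] at hfbr
          have := hrl r hr
          omega
        simp only [if_neg hnomem]
        congr 1
        apply List.map_congr_left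
        intro r hr
        exact pv_fAB n hn r (hrl r hr) (by
          simp only [List.all_eq_true, decide_eq_true_eq] at hall
          exact hall r hr)
      · rw [if_neg hall]
        by_cases hle : rows.all (fun r => r.count '1' ≤ 1)
        · rw [if_pos hle]
          -- some row has zero '1's, so -1 survives in the route
          have : ∃ r ∈ rows, r.count '1' = 0 := by
            simp only [List.all_eq_true, decide_eq_true_eq] at hall hle
            push_neg at hall
            obtain ⟨r, hr, hne⟩ := hall
            exact ⟨r, hr, by have := hle r hr; omega⟩
          obtain ⟨r, hr, h0⟩ := this
          have hmem : (-1 : Int) ∈ rows.map (pvFB n) := by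
            refine List.mem_map.mpr ⟨r, hr, ?_⟩
            simp [pvFB, h0]
          simp [hmem]
        · rw [if_neg hle]

-- ===== VERDICT (by name: the statement is the Claim_ definition above) =====
theorem decode_route_spec : Claim_equal_decode_route := by
  intro bitstring n_cities _ hpre
  unfold Spec_decode_route
  exact pv_main bitstring n_cities hpre
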